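-- pv_equiv track=rewrite | github.com/AlekseyEA/Algorithms | lab-4/2.py | treasure
-- ===== SOURCE A (Python) =====
-- def treasure(string):
--     i = 0
--
--     while i < len(string):
--         if string[i] == ' ':
--             string = string[:i] + string[i + 1:]
--         else:
--             i += 1
--
--     prev_chars = {}
--     char_tup = [(0, 0) for _ in range(len(string))]
--
--     for i in range(len(string)):
--         if string[i] in prev_chars:
--             prev_index = prev_chars[string[i]]
--             prev_state = char_tup[prev_index]
--             char_tup[i] = (prev_state[0] + 1, prev_state[1] + (i - 1 - prev_index) + (prev_state[0] * (i - prev_index)))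
--         prev_chars[string[i]] = i
--
--     result = 0
--     for state in char_tup:
--         result += state[1]
--     return result
-- ===== SOURCE B (Python) =====
-- def treasure(string):
--     chars = [c for c in string if c != ' ']
--     positions = {}
--     for i, c in enumerate(chars):
--         positions.setdefault(c, []).append(i)
--     result = 0
--     for ps in positions.values():
--         count = 0
--         sum_prev = 0
--         for p in ps:
--             result += count * p - sum_prev - count
--             count += 1
--             sum_prev += p
--     return result
-- ===== Notes on version B (the rewrite author's own statement) =====
-- stated objective: faster
-- what changed: Instead of A's interleaved left-to-right scan that stores chained (count, cumulative-metric) tuples in a per-index array keyed through a last-occurrence dict, B groups the indices of each character into a dict of position lists and sums each occurrence's contribution directly by the closed form count*p - sum_prev - count using running prefix sums; A's quadratic slice-based space stripping is replaced by a single filtering pass.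
import Mathlib
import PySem

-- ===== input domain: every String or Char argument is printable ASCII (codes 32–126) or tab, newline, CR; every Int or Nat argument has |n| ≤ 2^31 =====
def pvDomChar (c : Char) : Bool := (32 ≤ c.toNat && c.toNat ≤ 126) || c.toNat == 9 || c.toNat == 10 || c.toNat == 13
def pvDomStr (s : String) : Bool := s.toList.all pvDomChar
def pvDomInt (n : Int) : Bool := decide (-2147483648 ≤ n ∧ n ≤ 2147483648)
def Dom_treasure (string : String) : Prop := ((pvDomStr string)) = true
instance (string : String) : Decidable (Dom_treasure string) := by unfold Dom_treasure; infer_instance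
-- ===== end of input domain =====

-- B re-groups the scan: a dict of per-character position lists summed by a closed-form
-- prefix-sum formula replaces A's chained (count, metric) tuples, and a single filtering
-- pass replaces A's slice-based space removal (objective: alternative decomposition).

-- ===== PORT A =====
-- A's while loop: `if string[i]==' ': string = string[:i]+string[i+1:] else: i += 1`.
-- string[:i] = take i, string[i+1:] = drop (i+1) — exact for 0 ≤ i; the indexing
-- string[i] happens only under i < len(string), so s.getD i ' ' is exact there.
def stripA (s : List Char) (i : Nat) : List Char :=
  if h : i < s.length then
    if s.getD i ' ' = ' ' then
      stripA (s.take i ++ s.drop (i + 1)) i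
    else
      stripA s (i + 1)
  else s
termination_by s.length - i
decreasing_by
  · simp only [List.length_append, List.length_take, List.length_drop]; omega
  · omega

-- one iteration of A's `for i in range(len(string))` loop; state = (prev_chars, char_tup).
-- prev_chars values are Python ints, always ≥ 0 here, so `.toNat` on the lookup is exact.
def stepA (s : List Char) (st : PySem.Dict Char Int × List (Int × Int)) (i : Nat) :
    PySem.Dict Char Int × List (Int × Int) :=
  let c := s.getD i ' '
  let tup :=
    match st.1.get? c with
    | some q =>
        let ps := st.2.getD q.toNat (0, 0)
        st.2.set i (ps.1 + 1, ps.2 + ((i : Int) - 1 - q) + ps.1 * ((i : Int) - q))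
    | none => st.2
  (st.1.insert c (i : Int), tup)

def treasure (string : String) : Int :=
  let s := stripA string.toList 0
  let n := s.length
  let fin := (List.range n).foldl (stepA s) (PySem.Dict.empty, List.replicate n ((0 : Int), (0 : Int)))
  fin.2.foldl (fun r p => r + p.2) 0

-- ===== PORT B =====
-- one iteration of B's inner loop; state = (result, count, sum_prev)
def istepB (st : Int × Int × Int) (p : Int) : Int × Int × Int :=
  (st.1 + st.2.1 * p - st.2.2 - st.2.1, st.2.1 + 1, st.2.2 + p)

-- B's per-character-list loop, threading the running result r
def outerB (r : Int) (ps : List Int) : Int := (ps.foldl istepB (r, 0, 0)).1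

def treasure_alt (string : String) : Int :=
  let chars := string.toList.filter (fun c => c ≠ ' ')
  -- positions.setdefault(c, []).append(i)  ==  positions[c] = positions.get(c, []) + [i]  (Dict.modify)
  let d : PySem.Dict Char (List Int) := (PySem.List.enumerate chars).foldl
      (fun d p => d.modify p.2 ([] : List Int) (· ++ [p.1])) PySem.Dict.empty
  d.values.foldl outerB 0

-- ===== PRECONDITION & SPEC =====
def Spec_treasure (string : String) (out : Int) : Prop := out = treasure_alt string
instance (string : String) (out : Int) : Decidable (Spec_treasure string out) := by unfold Spec_treasure; infer_instance

-- ===== CLAIM (what is proved, stated in full; the proofs are below) =====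
def Claim_equal_treasure : Prop := ∀ (string : String), Dom_treasure string → Spec_treasure string (treasure string)

-- ===== LEMMAS AND PROOFS =====

-- `occ l k c`: the indices t < k with l[t] = c, in order (positions of c in the prefix).
def occ (l : List Char) (k : Nat) (c : Char) : List Nat :=
  (List.range k).filter (fun t => l.getD t ' ' == c)

-- value of A's char_tup[j].2 in closed form: sum of (j - t - 1) over earlier occurrences
def Mval (l : List Char) (j : Nat) : Int :=
  ((occ l j (l.getD j ' ')).map (fun t => Int.ofNat j - Int.ofNat t - 1)).sum

-- B's per-list metric
def gB (ps : List Int) : Int := (ps.foldl istepB (0, 0, 0)).1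

lemma sum_sub_form (Q : List Nat) (k : Int) :
    ((Q.map (fun t => k - Int.ofNat t - 1)).sum) =
      (Q.length : Int) * k - (Q.map (fun t => Int.ofNat t)).sum - Q.length := by
  induction Q with
  | nil => simp
  | cons a Q ih =>
      simp only [List.map_cons, List.sum_cons, List.length_cons, ih]
      push_cast; ring

lemma stripA_eq (s : List Char) (i : Nat) :
    stripA s i = s.take i ++ (s.drop i).filter (fun c => c ≠ ' ') := by
  fun_induction stripA s i with
  | case1 s i h hsp ih =>
      rw [ih]
      have hL : (s.take i).length = i := by simp; omega
      have hg : s[i] = ' ' := (List.getD_eq_getElem s ' ' h).symm.trans hsp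
      have hd : s.drop i = s[i] :: s.drop (i+1) := List.drop_eq_getElem_cons h
      have e1 : List.take i (s.take i ++ s.drop (i+1)) = s.take i := by
        rw [List.take_append_of_le_length (le_of_eq hL.symm), List.take_take]; simp
      have e2 : List.drop i (s.take i ++ s.drop (i+1)) = s.drop (i+1) := by
        rw [List.drop_append_of_le_length (le_of_eq hL.symm),
          List.drop_of_length_le (le_of_eq hL), List.nil_append]
      rw [e1, e2, hd, List.filter_cons_of_neg (by simp [hg])]
  | case2 s i h hsp ih =>
      have hg : s[i] ≠ ' ' := fun he =>
        hsp ((List.getD_eq_getElem s ' ' h).trans he)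
      have hd : s.drop i = s[i] :: s.drop (i+1) := List.drop_eq_getElem_cons h
      have e3 : s.take (i+1) = s.take i ++ [s[i]] := by
        rw [List.take_add_one, List.getElem?_eq_getElem h]; rfl
      rw [ih, e3, hd, List.filter_cons_of_pos (by simp [hg]), List.append_assoc]
      rfl
  | case3 s i h =>
      rw [List.take_of_length_le (by omega), List.drop_of_length_le (by omega)]
      simp

lemma occ_succ (l : List Char) (k : Nat) (c : Char) :
    occ l (k + 1) c = occ l k c ++ if l.getD k ' ' == c then [k] else [] := by
  simp only [occ, List.range_succ, List.filter_append]
  split <;> simp_all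

lemma occ_mem {l : List Char} {k t : Nat} {c : Char} (h : t ∈ occ l k c) :
    t < k ∧ l.getD t ' ' = c := by
  simp only [occ, List.mem_filter, List.mem_range, beq_iff_eq] at h
  exact h

lemma occ_last {l : List Char} {k q : Nat} {c : Char}
    (h : (occ l k c).getLast? = some q) :
    occ l k c = occ l q c ++ [q] ∧ q < k ∧ l.getD q ' ' = c := by
  have hqm : q ∈ occ l k c := List.mem_of_mem_getLast? (by simp [h])
  obtain ⟨hqk, hqc⟩ := occ_mem hqm
  have hsplit : List.range k = List.range (q+1) ++ (List.range (k - (q+1))).map (fun x => (q+1) + x) := by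
    rw [← List.range_add]; congr 1; omega
  have hocc : occ l k c = occ l (q+1) c ++
      ((List.range (k - (q+1))).map (fun x => (q+1) + x)).filter (fun t => l.getD t ' ' == c) := by
    rw [occ, hsplit, List.filter_append]; rfl
  set suf := ((List.range (k - (q+1))).map (fun x => (q+1) + x)).filter (fun t => l.getD t ' ' == c) with hsuf
  have hnil : suf = [] := by
    by_contra hne
    have : suf.getLast? = some q := by
      rw [hocc] at h
      rwa [List.getLast?_append_of_ne_nil _ hne] at h
    have hqs : q ∈ suf := List.mem_of_mem_getLast? (by simp [this])
    have := List.mem_filter.mp hqs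
    obtain ⟨hm, -⟩ := this
    obtain ⟨x, -, hx⟩ := List.mem_map.mp hm
    omega
  have : occ l (q+1) c = occ l q c ++ [q] := by
    rw [occ_succ, hqc]; simp
  rw [hocc, hnil, List.append_nil, this]
  exact ⟨rfl, hqk, hqc⟩

lemma istep_spec (ps : List Int) : ∀ r cnt sp : Int,
    ps.foldl istepB (r, cnt, sp) =
      (r + (ps.foldl istepB (0, cnt, sp)).1, cnt + ps.length, sp + ps.sum) := by
  induction ps with
  | nil => intro r cnt sp; simp
  | cons p ps ih =>
      intro r cnt sp
      simp only [List.foldl_cons, istepB, List.length_cons, List.sum_cons]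
      rw [ih, ih (0 + cnt * p - sp - cnt)]
      simp only [Prod.mk.injEq]
      refine ⟨by ring, by push_cast; ring, by ring⟩

lemma outer_spec (L : List (List Int)) : ∀ r : Int,
    L.foldl outerB r = r + (L.map gB).sum := by
  induction L with
  | nil => intro r; simp
  | cons ps L ih =>
      intro r
      simp only [List.foldl_cons, List.map_cons, List.sum_cons]
      rw [ih]
      have : outerB r ps = r + gB ps := by
        simp only [outerB, gB]; rw [istep_spec]
      omega

lemma g_append (Q : List Int) (p : Int) :
    gB (Q ++ [p]) = gB Q + ((Q.length : Int) * p - Q.sum - Q.length) := by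
  have h2 : (Q.foldl istepB ((0:Int),0,0)).2.1 = (Q.length : Int) := by rw [istep_spec]; simp
  have h3 : (Q.foldl istepB ((0:Int),0,0)).2.2 = Q.sum := by rw [istep_spec]; simp
  simp only [gB, List.foldl_append, List.foldl_cons, List.foldl_nil, istepB]
  rw [h2, h3]
  ring

-- A's loop invariant: after k iterations prev_chars maps each char to its last
-- occurrence among the first k positions, and char_tup[j] is (count, Mval) for j < k.
lemma A_loop (l : List Char) (k : Nat) (hk : k ≤ l.length) :
    (∀ c : Char,
      ((List.range k).foldl (stepA l) (PySem.Dict.empty, List.replicate l.length ((0:Int),(0:Int)))).1.get? c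
        = ((occ l k c).getLast?).map (fun q => Int.ofNat q)) ∧
    ((List.range k).foldl (stepA l) (PySem.Dict.empty, List.replicate l.length ((0:Int),(0:Int)))).2
      = (List.range l.length).map
          (fun j => if j < k then (((occ l j (l.getD j ' ')).length : Int), Mval l j) else ((0:Int),(0:Int))) := by
  revert hk
  induction k with
  | zero =>
      intro _
      constructor
      · intro c
        simp [occ, PySem.Dict.get?_empty]
      · simp only [List.range_zero, List.foldl_nil]
        have : (List.range l.length).map
            (fun j => if j < 0 then (((occ l j (l.getD j ' ')).length : Int), Mval l j) else ((0:Int),(0:Int)))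
            = (List.range l.length).map (fun _ => ((0:Int),(0:Int))) :=
          List.map_congr_left (fun j _ => by simp)
        rw [this, List.map_const', List.length_range]
  | succ k ih =>
      intro hk
      obtain ⟨h1, h2⟩ := ih (by omega)
      rw [List.range_succ, List.foldl_append, List.foldl_cons, List.foldl_nil]
      set st := (List.range k).foldl (stepA l) (PySem.Dict.empty, List.replicate l.length ((0:Int),(0:Int))) with hst
      rcases hlast : (occ l k (l.getD k ' ')).getLast? with _ | q
      · -- first occurrence of this character
        have hocc : occ l k (l.getD k ' ') = [] := List.getLast?_eq_none_iff.mp hlast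
        have hstep : stepA l st k = (st.1.insert (l.getD k ' ') (k : Int), st.2) := by
          simp only [stepA, h1, hlast, Option.map_none]
        rw [hstep]
        constructor
        · intro c'
          rw [PySem.Dict.get?_insert, occ_succ]
          by_cases hc : c' = l.getD k ' '
          · subst hc
            simp
          · rw [if_neg hc, if_neg (by simpa using (Ne.symm hc)), List.append_nil, h1 c']
        · rw [h2]
          refine List.map_congr_left (fun j hj => ?_)
          by_cases hjk : j < k
          · rw [if_pos hjk, if_pos (by omega)]
          · by_cases hjk1 : j < k + 1
            · have : j = k := by omega
              subst this
              rw [if_neg hjk, if_pos hjk1]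
              simp only [Mval]
              rw [hocc]
              simp
            · rw [if_neg hjk, if_neg hjk1]
      · -- repeated character: q = previous index
        obtain ⟨hocceq, hqk, hqc⟩ := occ_last hlast
        have hqn : q < l.length := by omega
        have hps : st.2.getD q ((0:Int),(0:Int)) = (((occ l q (l.getD k ' ')).length : Int), Mval l q) := by
          rw [h2, List.getD_eq_getElem _ _ (by simp [List.length_map, List.length_range]; omega)]
          simp only [List.getElem_map, List.getElem_range]
          rw [if_pos hqk, hqc]
        have hstep : stepA l st k =
            (st.1.insert (l.getD k ' ') (k : Int),
              st.2.set k ((((occ l q (l.getD k ' ')).length : Int) + 1,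
                Mval l q + ((k : Int) - 1 - (q : Int)) + ((occ l q (l.getD k ' ')).length : Int) * ((k : Int) - (q : Int))))) := by
          simp only [stepA, h1, hlast, Option.map_some]
          rw [show (Int.ofNat q).toNat = q from rfl, hps]
          simp [Int.ofNat_eq_natCast]
        rw [hstep]
        constructor
        · intro c'
          rw [PySem.Dict.get?_insert, occ_succ]
          by_cases hc : c' = l.getD k ' '
          · subst hc
            simp
          · rw [if_neg hc, if_neg (by simpa using (Ne.symm hc)), List.append_nil, h1 c']
        · rw [h2]
          refine List.ext_getElem (by simp) (fun j hj1 hj2 => ?_)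
          rw [List.getElem_set]
          simp only [List.getElem_map, List.getElem_range]
          have hjn : j < l.length := by simpa using hj2
          by_cases hjk : j = k
          · subst hjk
            rw [if_pos rfl, if_pos (by omega)]
            have hlen : (occ l j (l.getD j ' ')).length = (occ l q (l.getD j ' ')).length + 1 := by
              rw [hocceq]; simp
            have hM : Mval l j = Mval l q + ((j : Int) - 1 - (q : Int)) + ((occ l q (l.getD j ' ')).length : Int) * ((j : Int) - (q : Int)) := by
              have e1 : Mval l j = ((occ l q (l.getD j ' ')).length : Int) * (j : Int)
                  - ((occ l q (l.getD j ' ')).map (fun t => Int.ofNat t)).sum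
                  + ((j : Int) - (q : Int) - 1) - (occ l q (l.getD j ' ')).length := by
                simp only [Mval]
                rw [hocceq, List.map_append, List.sum_append, sum_sub_form]
                simp only [List.map_cons, List.map_nil, List.sum_cons, List.sum_nil, Int.ofNat_eq_natCast]
                ring
              have e2 : Mval l q = ((occ l q (l.getD j ' ')).length : Int) * (q : Int)
                  - ((occ l q (l.getD j ' ')).map (fun t => Int.ofNat t)).sum - (occ l q (l.getD j ' ')).length := by
                simp only [Mval]
                rw [hqc, sum_sub_form]
                try simp only [Int.ofNat_eq_natCast]
                try push_cast
                try ring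
              rw [e1, e2]
              ring
            rw [hlen, hM]
            simp only [Prod.mk.injEq]
            refine ⟨by push_cast; try ring, by push_cast; try ring⟩
          · rw [if_neg (by omega : ¬ k = j)]
            by_cases hjk' : j < k
            · rw [if_pos hjk', if_pos (by omega)]
            · rw [if_neg hjk', if_neg (by omega)]


lemma A_eq (string : String) :
    treasure string =
      ((List.range (string.toList.filter (fun c => c ≠ ' ')).length).map
        (fun j => Mval (string.toList.filter (fun c => c ≠ ' ')) j)).sum := by
  have hs : stripA string.toList 0 = string.toList.filter (fun c => c ≠ ' ') := by
    rw [stripA_eq]; simp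
  simp only [treasure, hs]
  obtain ⟨-, h2⟩ := A_loop (string.toList.filter (fun c => c ≠ ' '))
    (string.toList.filter (fun c => c ≠ ' ')).length le_rfl
  rw [h2, PySem.List.foldl_add, List.map_map]
  rw [List.map_congr_left (fun j hj => ?_), zero_add]
  have hjl := List.mem_range.mp hj
  simp only [Function.comp_apply]
  rw [if_pos hjl]

lemma enum_positions (l : List Char) (c : Char) :
    ((PySem.List.enumerate l).filter (fun p => p.2 == c)).map (fun p => p.1)
      = (occ l l.length c).map (fun t => Int.ofNat t) := by
  rw [PySem.List.enumerate_eq_map_pyRange l ' ']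
  simp only [PySem.List.len]
  rw [PySem.List.pyRange_zero_natCast]
  simp only [List.map_map, List.filter_map, Function.comp_def, PySem.List.pyGetD_natCast, occ]
  simp

lemma sum_map_update {S : List Char} (hS : S.Nodup) {c : Char} (hc : c ∈ S)
    (f f' : Char → Int) (h : ∀ x ∈ S, x ≠ c → f' x = f x) :
    (S.map f').sum = (S.map f).sum + (f' c - f c) := by
  induction S with
  | nil => cases hc
  | cons a S ih =>
      rcases List.mem_cons.mp hc with rfl | hc'
      · have : ∀ x ∈ S, f' x = f x := fun x hx =>
          h x (List.mem_cons_of_mem _ hx) (fun he => (List.nodup_cons.mp hS).1 (he ▸ hx))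
        simp only [List.map_cons, List.sum_cons, List.map_congr_left this]
        ring
      · have ha : f' a = f a := h a List.mem_cons_self
          (fun he => (List.nodup_cons.mp hS).1 (he ▸ hc'))
        simp only [List.map_cons, List.sum_cons,
          ih (List.nodup_cons.mp hS).2 hc' (fun x hx hne => h x (List.mem_cons_of_mem _ hx) hne), ha]
        ring

lemma bridge (l : List Char) (k : Nat) (hk : k ≤ l.length) :
    (((PySem.Set.ofList (l.take k)).map (fun c => gB ((occ l k c).map (fun t => Int.ofNat t)))).sum)
      = ((List.range k).map (fun j => Mval l j)).sum := by
  induction k with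
  | zero => simp
  | succ k ihk =>
      have hkn : k < l.length := by omega
      have hgd : l.getD k ' ' = l[k] := List.getD_eq_getElem l ' ' hkn
      have ht : l.take (k+1) = l.take k ++ [l.getD k ' '] := by
        rw [List.take_add_one, List.getElem?_eq_getElem hkn, hgd]; rfl
      have hsucc_self : occ l (k+1) (l.getD k ' ') = occ l k (l.getD k ' ') ++ [k] := by
        rw [occ_succ]; simp
      have hdiff : gB ((occ l (k+1) (l.getD k ' ')).map (fun t => Int.ofNat t))
          = gB ((occ l k (l.getD k ' ')).map (fun t => Int.ofNat t)) + Mval l k := by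
        rw [hsucc_self, List.map_append]
        simp only [List.map_cons, List.map_nil]
        rw [g_append]
        have := sum_sub_form (occ l k (l.getD k ' ')) (Int.ofNat k)
        simp only [Mval]
        simp only [Int.ofNat_eq_natCast] at this ⊢
        rw [this]
        simp only [List.length_map]
        try push_cast
        try ring
      rw [ht, PySem.Set.ofList_append_singleton, List.range_succ, List.map_append,
        List.sum_append, ← ihk (by omega)]
      by_cases hc : l.getD k ' ' ∈ PySem.Set.ofList (l.take k)
      · rw [PySem.Set.add_of_mem hc]
        rw [sum_map_update (PySem.Set.nodup_ofList _) hc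
          (fun c => gB ((occ l k c).map (fun t => Int.ofNat t)))
          (fun c => gB ((occ l (k+1) c).map (fun t => Int.ofNat t)))
          (fun x _ hx => by
            beta_reduce
            rw [occ_succ, if_neg (by simpa using (Ne.symm hx)), List.append_nil])]
        rw [hdiff]
        simp only [List.map_cons, List.map_nil, List.sum_cons, List.sum_nil]
        try ring
      · have hocc0 : occ l k (l.getD k ' ') = [] := by
          rw [occ, List.filter_eq_nil_iff]
          intro t ht'
          rw [List.mem_range] at ht'
          intro hpred
          apply hc
          rw [PySem.Set.mem_ofList]
          rw [List.mem_take_iff_getElem]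
          have htl : t < l.length := by omega
          exact ⟨t, by omega, by
            have := List.getD_eq_getElem l ' ' htl
            rw [← this]; exact (beq_iff_eq.mp hpred)⟩
        rw [PySem.Set.add_of_not_mem hc, List.map_append, List.sum_append]
        have h1 : (PySem.Set.ofList (l.take k)).map (fun c => gB ((occ l (k+1) c).map (fun t => Int.ofNat t)))
            = (PySem.Set.ofList (l.take k)).map (fun c => gB ((occ l k c).map (fun t => Int.ofNat t))) :=
          List.map_congr_left (fun x hx => by
            rw [occ_succ, if_neg (by
              have : x ≠ l.getD k ' ' := fun he => hc (he ▸ hx)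
              simpa using (Ne.symm this)), List.append_nil])
        have h2 : gB ((occ l (k+1) (l.getD k ' ')).map (fun t => Int.ofNat t)) = Mval l k := by
          rw [hdiff, hocc0]
          simp [gB]
        rw [h1]
        simp only [List.map_cons, List.map_nil, List.sum_cons, List.sum_nil]
        rw [h2]
        try simp

lemma B_eq (string : String) :
    treasure_alt string =
      ((List.range (string.toList.filter (fun c => c ≠ ' ')).length).map
        (fun j => Mval (string.toList.filter (fun c => c ≠ ' ')) j)).sum := by
  simp only [treasure_alt]
  set l := string.toList.filter (fun c => c ≠ ' ') with hl
  set L := (PySem.List.enumerate l).map Prod.swap with hL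
  have hfold : (PySem.List.enumerate l).foldl
        (fun (d : PySem.Dict Char (List Int)) (p : Int × Char) => d.modify p.2 ([] : List Int) (· ++ [p.1]))
        PySem.Dict.empty
      = L.foldl (fun d p => d.modify p.1 ([] : List Int) (· ++ [p.2])) PySem.Dict.empty := by
    rw [hL, List.foldl_map]
    rfl
  rw [hfold]
  set d := L.foldl (fun d p => d.modify p.1 ([] : List Int) (· ++ [p.2])) PySem.Dict.empty with hd
  have hnodup : d.keys.Nodup := by
    rw [hd]
    exact PySem.Dict.nodup_keys_foldl_modify_key L Prod.fst ([] : List Int)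
      (fun _ p => (· ++ [p.2])) PySem.Dict.empty (by simp [PySem.Dict.keys_empty])
  have hkeys : d.keys = PySem.Set.ofList l := by
    rw [hd]
    rw [PySem.Dict.keys_foldl_modify_key L Prod.fst ([] : List Int)
      (fun _ p => (· ++ [p.2])) PySem.Dict.empty]
    have : L.map Prod.fst = l := by
      rw [hL, List.map_map]
      exact PySem.List.map_snd_enumerate l 0
    rw [this, PySem.Dict.keys_empty]
    rfl
  have hgetD : ∀ c : Char, d.getD c [] = (occ l l.length c).map (fun t => Int.ofNat t) := by
    intro c
    rw [hd, PySem.Dict.getD_foldl_modify_append, PySem.Dict.getD_empty, List.nil_append, hL]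
    rw [List.filter_map, List.map_map]
    exact enum_positions l c
  rw [PySem.Dict.values_eq_map_keys d hnodup [], outer_spec, zero_add, List.map_map, hkeys]
  have hmc : ((PySem.Set.ofList l).map (gB ∘ fun k => d.getD k []))
      = (PySem.Set.ofList l).map (fun c => gB ((occ l l.length c).map (fun t => Int.ofNat t))) :=
    List.map_congr_left (fun c _ => by simp [Function.comp, hgetD c])
  rw [hmc]
  have hb := bridge l l.length le_rfl
  rw [List.take_length] at hb
  rw [hb]

-- ===== VERDICT (by name: the statement is the Claim_ definition above) =====
theorem treasure_spec : Claim_equal_treasure := by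
  intro string _
  unfold Spec_treasure
  rw [A_eq, B_eq]
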